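-- pv_equiv track=rewrite | github.com/kelvin-273/pyragene | experiments/zigzag.py | dp_cost
-- ===== SOURCE A (Python) =====
-- from typing import List, Tuple
--
-- def dp_cost(x: List[Tuple[int]]):
--     n_loci = len(x)
--     out = [0] * n_loci
--     i = 0
--     while i < n_loci:
--         # INV: i >= 0 or x[i-1] == (0, 0)
--         while i < n_loci and x[i] == (0, 0):
--             out[i] = 0
--             i += 1
--         if i == n_loci:
--             break
--
--         out[i] = 1
--         while i < n_loci and x[i] == (1, 1):
--             out[i] = 1
--             i += 1
--         if i < n_loci and x[i] != (0, 0):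
--             out[i] = 1
--
--         while i < n_loci and x[i] != (0, 0):
--             j = i + 1
--             while j < n_loci and (x[j] == x[i] or x[j] == (1, 1)):
--                 out[j] = out[i]
--                 j += 1
--             if j == n_loci or x[j] == (0, 0):
--                 i = j
--                 break
--
--             out[j] = out[i] + 1
--             i = j
--
--     return [(z + 1) // 2 for z in out]
-- ===== SOURCE B (Python) =====
-- from typing import List, Tuple
--
-- def dp_cost(x: List[Tuple[int]]):
--     # single flat pass: state machine with current level, reference value, in-segment flag
--     out = []
--     level = 0
--     ref = None
--     in_segment = False
--     for v in x:
--         if v == (0, 0):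
--             out.append(0)
--             in_segment = False
--             ref = None
--         else:
--             if not in_segment:
--                 level = 1
--                 in_segment = True
--                 ref = None
--             if v == (1, 1):
--                 out.append(level)
--             elif ref is None:
--                 ref = v
--                 out.append(level)
--             elif v == ref:
--                 out.append(level)
--             else:
--                 level += 1
--                 ref = v
--                 out.append(level)
--     return [(z + 1) // 2 for z in out]
-- ===== Notes on version B (the rewrite author's own statement) =====
-- stated objective: simpler
-- what changed: Replaced A's nested two-pointer while-loops that rescan and overwrite a preallocated out array with a single flat for-loop state machine maintaining (level, ref, in_segment) and appending one output per element.
import Mathlib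
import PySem

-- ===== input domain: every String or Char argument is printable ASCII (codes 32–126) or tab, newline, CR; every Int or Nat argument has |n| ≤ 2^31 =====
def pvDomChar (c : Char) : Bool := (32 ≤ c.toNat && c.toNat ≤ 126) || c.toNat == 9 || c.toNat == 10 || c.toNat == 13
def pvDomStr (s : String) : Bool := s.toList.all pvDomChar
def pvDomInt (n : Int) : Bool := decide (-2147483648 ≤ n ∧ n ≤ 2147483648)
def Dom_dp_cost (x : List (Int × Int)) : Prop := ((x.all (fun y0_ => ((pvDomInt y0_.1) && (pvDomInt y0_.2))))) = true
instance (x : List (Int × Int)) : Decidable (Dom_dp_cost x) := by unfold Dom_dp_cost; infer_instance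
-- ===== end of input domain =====

-- B replaces A's nested two-pointer while-loops with a single flat state-machine pass (simpler decomposition, same cost).

-- ===== PORT A =====
-- x[i] for a Nat index that the source always guards with i < len(x); exact on that guarded range
def pvGetp (x : List (Int × Int)) (i : Nat) : Int × Int := x.getD i (0, 0)

-- each while-loop is ported as structural recursion on a fuel counter; the fuel (always len(x)+1 at the
-- call sites, more than the number of iterations any of these loops can make) is only a totality guard

-- while i < n_loci and x[i] == (0, 0): out[i] = 0; i += 1
def pvA_loop1 (x : List (Int × Int)) : Nat → Nat → List Int → Nat × List Int
  | 0, i, out => (i, out)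
  | fuel + 1, i, out =>
    if i < x.length ∧ pvGetp x i = (0, 0) then pvA_loop1 x fuel (i + 1) (out.set i 0)
    else (i, out)

-- while i < n_loci and x[i] == (1, 1): out[i] = 1; i += 1
def pvA_loop2 (x : List (Int × Int)) : Nat → Nat → List Int → Nat × List Int
  | 0, i, out => (i, out)
  | fuel + 1, i, out =>
    if i < x.length ∧ pvGetp x i = (1, 1) then pvA_loop2 x fuel (i + 1) (out.set i 1)
    else (i, out)

-- while j < n_loci and (x[j] == x[i] or x[j] == (1, 1)): out[j] = out[i]; j += 1
def pvA_loop4 (x : List (Int × Int)) (i : Nat) : Nat → Nat → List Int → Nat × List Int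
  | 0, j, out => (j, out)
  | fuel + 1, j, out =>
    if j < x.length ∧ (pvGetp x j = pvGetp x i ∨ pvGetp x j = (1, 1)) then
      pvA_loop4 x i fuel (j + 1) (out.set j (out.getD i 0))
    else (j, out)

-- while i < n_loci and x[i] != (0, 0): j = i+1; <loop4>; if j == n or x[j] == (0,0): break; out[j] = out[i]+1; i = j
def pvA_loop3 (x : List (Int × Int)) : Nat → Nat → List Int → Nat × List Int
  | 0, i, out => (i, out)
  | fuel + 1, i, out =>
    if i < x.length ∧ pvGetp x i ≠ (0, 0) then
      match pvA_loop4 x i (x.length + 1) (i + 1) out with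
      | (j, out') =>
        if j = x.length ∨ pvGetp x j = (0, 0) then (j, out')
        else pvA_loop3 x fuel j (out'.set j (out'.getD i 0 + 1))
    else (i, out)

-- the outer while-loop of A
def pvA_outer (x : List (Int × Int)) : Nat → Nat → List Int → List Int
  | 0, _, out => out
  | fuel + 1, i, out =>
    if i < x.length then
      match pvA_loop1 x (x.length + 1) i out with
      | (i1, out1) =>
        if i1 = x.length then out1
        else
          match pvA_loop2 x (x.length + 1) i1 (out1.set i1 1) with
          | (i2, out2) =>
            let out3 := if i2 < x.length ∧ pvGetp x i2 ≠ (0, 0) then out2.set i2 1 else out2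
            match pvA_loop3 x (x.length + 1) i2 out3 with
            | (i3, out4) => pvA_outer x fuel i3 out4
    else out

def dp_cost (x : List (Int × Int)) : List Int :=
  (pvA_outer x (x.length + 1) 0 (List.replicate x.length 0)).map
    (fun z => PySem.Int.floordiv (z + 1) 2)

-- ===== PORT B =====
-- the for-loop of Source B appending one output per element, state (level, ref, in_segment)
def pvB_go (lvl : Int) (ref : Option (Int × Int)) (inseg : Bool) : List (Int × Int) → List Int
  | [] => []
  | v :: rest =>
    if v = ((0 : Int), (0 : Int)) then 0 :: pvB_go lvl none false rest
    else
      let lvl' := if !inseg then 1 else lvl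
      let ref' := if !inseg then none else ref
      if v = ((1 : Int), (1 : Int)) then lvl' :: pvB_go lvl' ref' true rest
      else
        match ref' with
        | none => lvl' :: pvB_go lvl' (some v) true rest
        | some r =>
          if v = r then lvl' :: pvB_go lvl' (some r) true rest
          else (lvl' + 1) :: pvB_go (lvl' + 1) (some v) true rest

def dp_cost_alt (x : List (Int × Int)) : List Int :=
  (pvB_go 0 none false x).map (fun z => PySem.Int.floordiv (z + 1) 2)

-- ===== PRECONDITION & SPEC =====
def Spec_dp_cost (x : List (Int × Int)) (out : List Int) : Prop := out = dp_cost_alt x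
instance (x : List (Int × Int)) (out : List Int) : Decidable (Spec_dp_cost x out) := by unfold Spec_dp_cost; infer_instance

-- ===== CLAIM (what is proved, stated in full; the proofs are below) =====
def Claim_equal_dp_cost : Prop := ∀ (x : List (Int × Int)), Dom_dp_cost x → Spec_dp_cost x (dp_cost x)

-- ===== LEMMAS AND PROOFS =====

-- list helpers
theorem pv_take_set_succ {l : List Int} {i : Nat} (h : i < l.length) (a : Int) :
    (l.set i a).take (i + 1) = l.take i ++ [a] := by
  induction l generalizing i with
  | nil => simp at h
  | cons b t ih =>
      cases i with
      | zero => simp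
      | succ k => simp [List.set, ih (by simpa using h)]

theorem pv_getD_set_ne {l : List Int} {i j : Nat} (h : i ≠ j) (a d : Int) :
    (l.set j a).getD i d = l.getD i d := by
  simp [List.getD, List.getElem?_set_ne (Ne.symm h)]

theorem pv_getD_set_self {l : List Int} {i : Nat} (h : i < l.length) (a d : Int) :
    (l.set i a).getD i d = a := by
  simp [List.getD, List.getElem?_set_self h]

theorem pv_drop_cons {x : List (Int × Int)} {i : Nat} (h : i < x.length) :
    x.drop i = pvGetp x i :: x.drop (i + 1) := by
  rw [List.drop_eq_getElem_cons h]
  simp [pvGetp, List.getD, List.getElem?_eq_getElem h]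

-- level is irrelevant in the out-of-segment state
theorem pvB_go_level (xs : List (Int × Int)) (l l' : Int) :
    pvB_go l none false xs = pvB_go l' none false xs := by
  induction xs generalizing l l' with
  | nil => rfl
  | cons v t ih =>
      by_cases hv : v = ((0 : Int), (0 : Int))
      · simp [pvB_go, hv, ih l l']
      · simp [pvB_go, hv]

-- at level 1 with no reference, being in or out of a segment makes no difference
theorem pvB_go_tf (xs : List (Int × Int)) :
    pvB_go 1 none true xs = pvB_go 1 none false xs := by
  cases xs with
  | nil => rfl
  | cons v t =>
      by_cases hv : v = ((0 : Int), (0 : Int))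
      · simp [pvB_go, hv]
      · simp [pvB_go, hv]

-- in-segment state collapses to the fresh state at a segment end ([] or (0,0))
theorem pvB_go_end (xs : List (Int × Int)) (l : Int) (r : Option (Int × Int))
    (h : xs = [] ∨ pvGetp xs 0 = (0, 0)) :
    pvB_go l r true xs = pvB_go 1 none false xs := by
  cases xs with
  | nil => rfl
  | cons v t =>
      have hv : v = ((0 : Int), (0 : Int)) := by
        rcases h with h | h
        · simp at h
        · simpa [pvGetp] using h
      simp [pvB_go, hv, pvB_go_level t l 1]

-- loop1 simulation
theorem pvA_loop1_spec (x : List (Int × Int)) (fuel i : Nat) (out : List Int)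
    (hf : x.length ≤ i + fuel) (hi : i ≤ x.length) (ho : out.length = x.length) :
    i ≤ (pvA_loop1 x fuel i out).1 ∧ (pvA_loop1 x fuel i out).1 ≤ x.length ∧
    ((pvA_loop1 x fuel i out).1 < x.length → pvGetp x (pvA_loop1 x fuel i out).1 ≠ (0, 0)) ∧
    (pvA_loop1 x fuel i out).2.length = x.length ∧
    (pvA_loop1 x fuel i out).2.take (pvA_loop1 x fuel i out).1 ++
        pvB_go 1 none false (x.drop (pvA_loop1 x fuel i out).1)
      = out.take i ++ pvB_go 1 none false (x.drop i) := by
  induction fuel generalizing i out with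
  | zero =>
      rw [pvA_loop1]
      simp only []
      refine ⟨le_refl _, hi, fun hl => absurd hl (by omega), ho, trivial⟩
  | succ fuel ih =>
      rw [pvA_loop1]
      by_cases h : i < x.length ∧ pvGetp x i = (0, 0)
      · rw [if_pos h]
        obtain ⟨hA, hB, hP, hL, hC⟩ := ih (i + 1) (out.set i 0) (by omega) (by omega) (by simpa using ho)
        refine ⟨by omega, hB, hP, hL, ?_⟩
        rw [hC, pv_take_set_succ (by omega), pv_drop_cons h.1, h.2]
        simp [pvB_go]
      · rw [if_neg h]
        refine ⟨le_refl _, hi, fun hl hz => h ⟨hl, hz⟩, ho, rfl⟩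

-- loop2 simulation
theorem pvA_loop2_spec (x : List (Int × Int)) (fuel i : Nat) (out : List Int)
    (hf : x.length ≤ i + fuel) (hi : i ≤ x.length) (ho : out.length = x.length) :
    i ≤ (pvA_loop2 x fuel i out).1 ∧ (pvA_loop2 x fuel i out).1 ≤ x.length ∧
    ((pvA_loop2 x fuel i out).1 < x.length → pvGetp x (pvA_loop2 x fuel i out).1 ≠ (1, 1)) ∧
    (pvA_loop2 x fuel i out).2.length = x.length ∧
    (pvA_loop2 x fuel i out).2.take (pvA_loop2 x fuel i out).1 ++
        pvB_go 1 none true (x.drop (pvA_loop2 x fuel i out).1)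
      = out.take i ++ pvB_go 1 none true (x.drop i) := by
  induction fuel generalizing i out with
  | zero =>
      rw [pvA_loop2]
      simp only []
      refine ⟨le_refl _, hi, fun hl => absurd hl (by omega), ho, trivial⟩
  | succ fuel ih =>
      rw [pvA_loop2]
      by_cases h : i < x.length ∧ pvGetp x i = (1, 1)
      · rw [if_pos h]
        obtain ⟨hA, hB, hP, hL, hC⟩ := ih (i + 1) (out.set i 1) (by omega) (by omega) (by simpa using ho)
        refine ⟨by omega, hB, hP, hL, ?_⟩
        rw [hC, pv_take_set_succ (by omega), pv_drop_cons h.1, h.2]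
        norm_num [pvB_go]
      · rw [if_neg h]
        refine ⟨le_refl _, hi, fun hl hz => h ⟨hl, hz⟩, ho, rfl⟩

-- loop4 simulation, mid-segment at level v with reference value x[i]
theorem pvA_loop4_spec (x : List (Int × Int)) (i : Nat) (fuel j : Nat) (out : List Int) (v : Int)
    (hf : x.length ≤ j + fuel) (hij : i < j) (hj : j ≤ x.length) (ho : out.length = x.length)
    (hv : out.getD i 0 = v)
    (hr0 : pvGetp x i ≠ (0, 0)) (hr1 : pvGetp x i ≠ (1, 1)) :
    j ≤ (pvA_loop4 x i fuel j out).1 ∧ (pvA_loop4 x i fuel j out).1 ≤ x.length ∧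
    (pvA_loop4 x i fuel j out).2.length = x.length ∧
    (pvA_loop4 x i fuel j out).2.getD i 0 = v ∧
    ((pvA_loop4 x i fuel j out).1 < x.length →
      pvGetp x (pvA_loop4 x i fuel j out).1 ≠ pvGetp x i ∧
      pvGetp x (pvA_loop4 x i fuel j out).1 ≠ (1, 1)) ∧
    (pvA_loop4 x i fuel j out).2.take (pvA_loop4 x i fuel j out).1 ++
        pvB_go v (some (pvGetp x i)) true (x.drop (pvA_loop4 x i fuel j out).1)
      = out.take j ++ pvB_go v (some (pvGetp x i)) true (x.drop j) := by
  induction fuel generalizing j out with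
  | zero =>
      rw [pvA_loop4]
      simp only []
      refine ⟨le_refl _, hj, ho, hv, fun hl => absurd hl (by omega), trivial⟩
  | succ fuel ih =>
      rw [pvA_loop4]
      by_cases h : j < x.length ∧ (pvGetp x j = pvGetp x i ∨ pvGetp x j = (1, 1))
      · rw [if_pos h]
        obtain ⟨hA, hB, hL, hD, hE, hF⟩ :=
          ih (j + 1) (out.set j (out.getD i 0)) (by omega) (by omega) (by omega)
            (by simpa using ho) (by rw [pv_getD_set_ne (by omega), hv])
        refine ⟨by omega, hB, hL, hD, hE, ?_⟩
        rw [hF, hv, pv_take_set_succ (by omega), pv_drop_cons h.1]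
        rcases h.2 with he | he
        · by_cases h11 : pvGetp x j = (1, 1)
          · rw [h11]; norm_num [pvB_go]
          · rw [he]; simp [pvB_go, hr0, hr1]
        · rw [he]; norm_num [pvB_go]
      · rw [if_neg h]
        refine ⟨le_refl _, hj, ho, hv, fun hl => ?_, rfl⟩
        constructor
        · intro he; exact h ⟨hl, Or.inl he⟩
        · intro he; exact h ⟨hl, Or.inr he⟩

-- loop3 simulation: consumes the rest of the segment, ending at [] or a (0,0)
theorem pvA_loop3_spec (x : List (Int × Int)) (fuel i : Nat) (out : List Int)
    (hf : x.length < i + fuel) (hi : i < x.length) (ho : out.length = x.length)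
    (hr0 : pvGetp x i ≠ (0, 0)) (hr1 : pvGetp x i ≠ (1, 1)) :
    i + 1 ≤ (pvA_loop3 x fuel i out).1 ∧ (pvA_loop3 x fuel i out).1 ≤ x.length ∧
    (pvA_loop3 x fuel i out).2.length = x.length ∧
    (pvA_loop3 x fuel i out).2.take (pvA_loop3 x fuel i out).1 ++
        pvB_go 1 none false (x.drop (pvA_loop3 x fuel i out).1)
      = out.take (i + 1) ++ pvB_go (out.getD i 0) (some (pvGetp x i)) true (x.drop (i + 1)) := by
  induction fuel generalizing i out with
  | zero => omega
  | succ fuel ih =>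
      rw [pvA_loop3, if_pos ⟨hi, hr0⟩]
      obtain ⟨hA, hB, hL, hD, hE, hF⟩ :=
        pvA_loop4_spec x i (x.length + 1) (i + 1) out (out.getD i 0)
          (by omega) (by omega) (by omega) ho rfl hr0 hr1
      rcases hp : pvA_loop4 x i (x.length + 1) (i + 1) out with ⟨j, out'⟩
      rw [hp] at hA hB hL hD hE hF
      simp only [] at hA hB hL hD hE hF ⊢
      by_cases h2 : j = x.length ∨ pvGetp x j = (0, 0)
      · rw [if_pos h2]
        refine ⟨by simpa using hA, by simpa using hB, by simpa using hL, ?_⟩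
        simp only []
        rw [← hF]
        congr 1
        refine (pvB_go_end _ _ _ ?_).symm
        by_cases hlt : j < x.length
        · right
          have hz : pvGetp x j = (0, 0) := by
            rcases h2 with h2 | h2
            · exact absurd h2 (by omega)
            · exact h2
          rw [pv_drop_cons hlt]
          simpa [pvGetp] using hz
        · left
          exact List.drop_eq_nil_of_le (by omega)
      · rw [if_neg h2]
        have hlt : j < x.length := by
          rcases Nat.lt_or_ge j x.length with h' | h'
          · exact h'
          · exact absurd (Or.inl (by omega)) h2
        have hne := hE hlt
        have hz : pvGetp x j ≠ (0, 0) := fun hh => h2 (Or.inr hh)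
        obtain ⟨iA, iB, iL, iC⟩ :=
          ih j (out'.set j (out'.getD i 0 + 1)) (by omega) hlt (by simpa using hL) hz hne.2
        refine ⟨by omega, iB, iL, ?_⟩
        rw [iC, pv_getD_set_self (by omega), pv_take_set_succ (by omega), hD]
        rw [← hF, pv_drop_cons hlt]
        simp [pvB_go, hz, hne.1, hne.2, List.append_assoc]

-- the outer loop equals B's flat pass on the remaining suffix
theorem pvA_outer_spec (x : List (Int × Int)) (fuel i : Nat) (out : List Int)
    (hf : x.length < i + fuel) (hi : i ≤ x.length) (ho : out.length = x.length) :
    pvA_outer x fuel i out = out.take i ++ pvB_go 1 none false (x.drop i) := by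
  induction fuel generalizing i out with
  | zero => omega
  | succ fuel ih =>
      rw [pvA_outer]
      by_cases h : i < x.length
      · rw [if_pos h]
        obtain ⟨hA, hAle, g1p, hB, hC⟩ := pvA_loop1_spec x (x.length + 1) i out (by omega) (by omega) ho
        rcases hp1 : pvA_loop1 x (x.length + 1) i out with ⟨i1, out1⟩
        rw [hp1] at hA hAle g1p hB hC
        simp only [] at hA hAle g1p hB hC ⊢
        by_cases h1 : i1 = x.length
        · rw [if_pos h1]
          rw [← hC, h1]
          have hd : List.drop x.length x = [] := List.drop_eq_nil_of_le le_rfl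
          rw [hd, ← hB, List.take_length]
          simp [pvB_go]
        · rw [if_neg h1]
          have hp1n : i1 < x.length := by omega
          have hx1 : pvGetp x i1 ≠ (0, 0) := g1p hp1n
          obtain ⟨jA, jB, jD, jC, jE⟩ :=
            pvA_loop2_spec x (x.length + 1) i1 (out1.set i1 1) (by omega) (by omega) (by simpa using hB)
          rcases hp2 : pvA_loop2 x (x.length + 1) i1 (out1.set i1 1) with ⟨i2, out2⟩
          rw [hp2] at jA jB jD jC jE
          simp only [] at jA jB jD jC jE ⊢
          have chain2 : out2.take i2 ++ pvB_go 1 none true (x.drop i2)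
              = out.take i ++ pvB_go 1 none false (x.drop i) := by
            rw [jE, List.take_set, List.set_eq_of_length_le (by simp), ← hC]
            congr 1
            rw [pvB_go_tf]
          by_cases hc : i2 < x.length ∧ pvGetp x i2 ≠ (0, 0)
          · -- segment continues: out3 = out2.set i2 1, loop3 runs
            have hx2 : pvGetp x i2 ≠ (1, 1) := jD hc.1
            obtain ⟨kA, kB, kL, kC⟩ :=
              pvA_loop3_spec x (x.length + 1) i2 (out2.set i2 1) (by omega) hc.1
                (by simpa using jC) hc.2 hx2
            simp only [if_pos hc]
            rcases hp3 : pvA_loop3 x (x.length + 1) i2 (out2.set i2 1) with ⟨i3, out4⟩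
            rw [hp3] at kA kB kL kC
            simp only [] at kA kB kL kC ⊢
            rw [ih i3 out4 (by omega) kB kL, kC, pv_getD_set_self (by omega),
              pv_take_set_succ (by omega)]
            rw [← chain2, pv_drop_cons hc.1]
            simp [pvB_go, hc.2, hx2, List.append_assoc]
          · -- segment already over at i2: loop3 is a no-op
            simp only [if_neg hc]
            rw [pvA_loop3, if_neg hc]
            have hstep : i < i2 ∨ x.length ≤ i2 := by
              by_cases hn : i2 < x.length
              · left
                have hz : pvGetp x i2 = (0, 0) := by
                  by_contra hzz; exact hc ⟨hn, hzz⟩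
                have : i2 ≠ i1 := fun he => hx1 (he ▸ hz)
                omega
              · right; omega
            rw [ih i2 out2 (by omega) jB jC, ← chain2]
            congr 1
            exact (pvB_go_tf _).symm
      · rw [if_neg h]
        have : i = x.length := by omega
        subst this
        rw [List.drop_length, ← ho, List.take_length]
        simp [pvB_go]

-- ===== VERDICT (by name: the statement is the Claim_ definition above) =====
theorem dp_cost_spec : Claim_equal_dp_cost := by
  intro x _
  unfold Spec_dp_cost dp_cost dp_cost_alt
  rw [pvA_outer_spec x (x.length + 1) 0 (List.replicate x.length 0) (by omega) (by omega) (by simp)]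
  simp [pvB_go_level x 1 0]
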